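-- pv_equiv track=rewrite | github.com/jxwalker/cursor-pr-review | cursor_pr_review.py | _parse_ai_analysis
-- ===== SOURCE A (Python) =====
-- from typing import Dict, Any, Optional, List, Union, Tuple
--
-- def _parse_ai_analysis(analysis: str) -> List[Dict[str, Any]]:
--     """Parse AI analysis into structured review comments."""
--     comments = []
--
--     # Enhanced parsing - look for various types of issues
--     lines = analysis.split('\n')
--     current_comment = ""
--     severity = "info"
--
--     for line in lines:
--         line = line.strip()
--         if not line:
--             if current_comment:
--                 comments.append({
--                     'body': current_comment.strip(),
--                     'severity': severity,
--                     'path': None,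
--                     'line': None
--                 })
--                 current_comment = ""
--                 severity = "info"
--             continue
--
--         # Detect severity levels
--         if any(word in line.lower() for word in ['critical', 'severe', 'security', 'vulnerability']):
--             severity = "critical"
--         elif any(word in line.lower() for word in ['error', 'bug', 'issue', 'problem']):
--             severity = "error"
--         elif any(word in line.lower() for word in ['warning', 'potential', 'consider']):
--             severity = "warning"
--         elif any(word in line.lower() for word in ['suggestion', 'improve', 'optimize']):
--             severity = "suggestion"
--
--         # Look for actionable feedback
--         if any(keyword in line.lower() for keyword in [
--             'issue', 'problem', 'bug', 'error', 'warning', 'critical',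
--             'security', 'vulnerability', 'consider', 'suggestion',
--             'improve', 'optimize', 'refactor', 'performance'
--         ]):
--             if current_comment:
--                 current_comment += " " + line
--             else:
--                 current_comment = line
--
--     # Add final comment if exists
--     if current_comment:
--         comments.append({
--             'body': current_comment.strip(),
--             'severity': severity,
--             'path': None,
--             'line': None
--         })
--
--     return comments
-- ===== SOURCE B (Python) =====
-- from typing import Dict, Any, List
--
-- _SEVERITY_TIERS = [
--     ("critical", ['critical', 'severe', 'security', 'vulnerability']),
--     ("error", ['error', 'bug', 'issue', 'problem']),
--     ("warning", ['warning', 'potential', 'consider']),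
--     ("suggestion", ['suggestion', 'improve', 'optimize']),
-- ]
--
-- _ACTIONABLE = [
--     'issue', 'problem', 'bug', 'error', 'warning', 'critical',
--     'security', 'vulnerability', 'consider', 'suggestion',
--     'improve', 'optimize', 'refactor', 'performance'
-- ]
--
--
-- def _blocks(analysis: str) -> List[List[str]]:
--     """Group the stripped non-empty lines into blocks separated by blank lines."""
--     blocks = []
--     pending = []
--     for raw in analysis.split('\n'):
--         line = raw.strip()
--         if line:
--             pending.append(line)
--         elif pending:
--             blocks.append(pending)
--             pending = []
--     if pending:
--         blocks.append(pending)
--     return blocks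
--
--
-- def _block_severity(block: List[str], severity: str) -> str:
--     for line in block:
--         low = line.lower()
--         for tag, words in _SEVERITY_TIERS:
--             if any(w in low for w in words):
--                 severity = tag
--                 break
--     return severity
--
--
-- def _parse_ai_analysis(analysis: str) -> List[Dict[str, Any]]:
--     """Parse AI analysis into structured review comments."""
--     comments = []
--     severity = "info"
--     for block in _blocks(analysis):
--         severity = _block_severity(block, severity)
--         body = " ".join(l for l in block
--                         if any(k in l.lower() for k in _ACTIONABLE))
--         if body:
--             comments.append({'body': body, 'severity': severity,
--                              'path': None, 'line': None})
--             severity = "info"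
--     return comments
-- ===== Notes on version B (the rewrite author's own statement) =====
-- stated objective: alternative
-- what changed: Replaced A's inline flush-on-blank-line state machine (incrementally concatenating the current comment string) with a two-phase pass: group stripped lines into blank-separated blocks, then map each block to a comment by folding the severity tier table over its lines and joining its actionable lines with ' '.
import Mathlib
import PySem

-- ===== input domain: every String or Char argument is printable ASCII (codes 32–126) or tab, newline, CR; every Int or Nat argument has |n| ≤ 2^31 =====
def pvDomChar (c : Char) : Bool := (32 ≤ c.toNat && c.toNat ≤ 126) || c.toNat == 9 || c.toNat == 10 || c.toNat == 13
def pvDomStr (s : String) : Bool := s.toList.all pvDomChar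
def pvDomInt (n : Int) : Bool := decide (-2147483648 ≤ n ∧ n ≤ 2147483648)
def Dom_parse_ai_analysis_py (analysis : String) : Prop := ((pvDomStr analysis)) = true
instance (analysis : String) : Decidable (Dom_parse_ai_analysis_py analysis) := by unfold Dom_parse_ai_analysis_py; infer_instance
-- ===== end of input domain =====

-- B replaces A's flush-on-blank-line state machine by an explicit two-phase pass (group lines
-- into blank-separated blocks, then map each block to severity + joined body); same cost, alternative decomposition.

-- ===== PORT A =====
-- shared output shape: {'body': …, 'severity': …, 'path': None, 'line': None}
def pvMk (body : List Char) (sev : String) : List (String × Option String) :=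
  [("body", some (String.ofList body)), ("severity", some sev), ("path", none), ("line", none)]

-- A's elif chain of severity keyword tiers
def pvSevA (low : List Char) (sev : String) : String :=
  if ["critical", "severe", "security", "vulnerability"].any (fun w => PySem.Chars.isIn w.toList low) then "critical"
  else if ["error", "bug", "issue", "problem"].any (fun w => PySem.Chars.isIn w.toList low) then "error"
  else if ["warning", "potential", "consider"].any (fun w => PySem.Chars.isIn w.toList low) then "warning"
  else if ["suggestion", "improve", "optimize"].any (fun w => PySem.Chars.isIn w.toList low) then "suggestion"
  else sev

-- A's inline actionable-keyword test
def pvActA (low : List Char) : Bool :=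
  ["issue", "problem", "bug", "error", "warning", "critical",
   "security", "vulnerability", "consider", "suggestion",
   "improve", "optimize", "refactor", "performance"].any (fun k => PySem.Chars.isIn k.toList low)

-- A's loop body: state = (comments, current_comment, severity)
def pvStepA (st : List (List (String × Option String)) × List Char × String) (raw : List Char) :
    List (List (String × Option String)) × List Char × String :=
  let line := PySem.Chars.strip raw
  if line = [] then
    if st.2.1 ≠ [] then (st.1 ++ [pvMk (PySem.Chars.strip st.2.1) st.2.2], [], "info") else st
  else
    let low := PySem.Chars.lower line
    let sev := pvSevA low st.2.2
    let cur := if pvActA low then (if st.2.1 ≠ [] then st.2.1 ++ ' ' :: line else line) else st.2.1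
    (st.1, cur, sev)

def parse_ai_analysis_py (analysis : String) : List (List (String × Option String)) :=
  let lines := PySem.Chars.splitOn analysis.toList ['\n']
  let st := lines.foldl pvStepA ([], [], "info")
  if st.2.1 ≠ [] then st.1 ++ [pvMk (PySem.Chars.strip st.2.1) st.2.2] else st.1

-- ===== PORT B =====
-- Source B's module constants _SEVERITY_TIERS and _ACTIONABLE
def pvTiers : List (String × List String) :=
  [("critical", ["critical", "severe", "security", "vulnerability"]),
   ("error", ["error", "bug", "issue", "problem"]),
   ("warning", ["warning", "potential", "consider"]),
   ("suggestion", ["suggestion", "improve", "optimize"])]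

def pvActB : List String :=
  ["issue", "problem", "bug", "error", "warning", "critical",
   "security", "vulnerability", "consider", "suggestion",
   "improve", "optimize", "refactor", "performance"]

-- Source B _blocks: group stripped non-empty lines into blank-separated blocks
def pvStepG (st : List (List (List Char)) × List (List Char)) (raw : List Char) :
    List (List (List Char)) × List (List Char) :=
  let line := PySem.Chars.strip raw
  if line ≠ [] then (st.1, st.2 ++ [line])
  else if st.2 ≠ [] then (st.1 ++ [st.2], []) else st

def pvBlocks (analysis : String) : List (List (List Char)) :=
  let st := (PySem.Chars.splitOn analysis.toList ['\n']).foldl pvStepG ([], [])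
  if st.2 ≠ [] then st.1 ++ [st.2] else st.1

-- Source B _block_severity: inner 'for tag, words … break' = first tier whose word list matches
def pvLineSevB (low : List Char) (sev : String) : String :=
  match pvTiers.find? (fun t => t.2.any (fun w => PySem.Chars.isIn w.toList low)) with
  | some t => t.1
  | none => sev

def pvBlockSev (block : List (List Char)) (sev : String) : String :=
  block.foldl (fun s l => pvLineSevB (PySem.Chars.lower l) s) sev

-- Source B: " ".join(l for l in block if any(k in l.lower() for k in _ACTIONABLE))
def pvBodyB (block : List (List Char)) : List Char :=
  PySem.Chars.join [' ']
    (block.filter (fun l => pvActB.any (fun k => PySem.Chars.isIn k.toList (PySem.Chars.lower l))))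

-- Source B main loop over blocks: state = (comments, severity)
def pvStepP (st : List (List (String × Option String)) × String) (block : List (List Char)) :
    List (List (String × Option String)) × String :=
  let sev := pvBlockSev block st.2
  let body := pvBodyB block
  if body ≠ [] then (st.1 ++ [pvMk body sev], "info") else (st.1, sev)

def parse_ai_analysis_py_alt (analysis : String) : List (List (String × Option String)) :=
  ((pvBlocks analysis).foldl pvStepP ([], "info")).1

-- ===== PRECONDITION & SPEC =====
def Spec_parse_ai_analysis_py (analysis : String) (out : List (List (String × Option String))) : Prop := out = parse_ai_analysis_py_alt analysis
instance (analysis : String) (out : List (List (String × Option String))) : Decidable (Spec_parse_ai_analysis_py analysis out) := by unfold Spec_parse_ai_analysis_py; infer_instance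

-- ===== CLAIM (what is proved, stated in full; the proofs are below) =====
def Claim_equal_parse_ai_analysis_py : Prop := ∀ (analysis : String), Dom_parse_ai_analysis_py analysis → Spec_parse_ai_analysis_py analysis (parse_ai_analysis_py analysis)

-- ===== LEMMAS AND PROOFS =====

-- the two keyword vocabularies coincide line by line
lemma pvLineSevB_eq (low : List Char) (sev : String) : pvLineSevB low sev = pvSevA low sev := by
  unfold pvLineSevB pvSevA pvTiers
  by_cases h1 : ["critical", "severe", "security", "vulnerability"].any (fun w => PySem.Chars.isIn w.toList low) <;>
  by_cases h2 : ["error", "bug", "issue", "problem"].any (fun w => PySem.Chars.isIn w.toList low) <;>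
  by_cases h3 : ["warning", "potential", "consider"].any (fun w => PySem.Chars.isIn w.toList low) <;>
  by_cases h4 : ["suggestion", "improve", "optimize"].any (fun w => PySem.Chars.isIn w.toList low) <;>
  simp [List.find?, h1, h2, h3, h4]

lemma pvActB_eq (low : List Char) :
    pvActB.any (fun k => PySem.Chars.isIn k.toList low) = pvActA low := rfl

lemma pvBodyB_nil : pvBodyB [] = [] := rfl

-- "ok l": every first/last character of l is non-whitespace (so stripping l is a no-op)
def pvOk (l : List Char) : Prop :=
  (∀ c, l.head? = some c → PySem.Chars.isspace c = false) ∧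
  (∀ c, l.getLast? = some c → PySem.Chars.isspace c = false)

lemma pv_dropWhile_head? (p : Char → Bool) (l : List Char) (c : Char)
    (h : (List.dropWhile p l).head? = some c) : p c = false := by
  cases hd : List.dropWhile p l with
  | nil => simp [hd] at h
  | cons a t =>
      rw [hd] at h; simp at h; subst h
      have := List.head_dropWhile_not p (l := l) (by simp [hd])
      simpa [hd] using this

lemma pv_dropWhile_eq_self (p : Char → Bool) (l : List Char)
    (h : ∀ c, l.head? = some c → p c = false) : List.dropWhile p l = l := by
  cases l with
  | nil => rfl
  | cons a t => simp [h a rfl]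

lemma pv_strip_of_ok (l : List Char) (h : pvOk l) : PySem.Chars.strip l = l := by
  unfold PySem.Chars.strip PySem.Chars.lstrip PySem.Chars.rstrip
  rw [pv_dropWhile_eq_self _ _ h.1]
  rw [pv_dropWhile_eq_self _ _ (by simpa [List.head?_reverse] using h.2), List.reverse_reverse]

lemma pv_ok_strip (s : List Char) : pvOk (PySem.Chars.strip s) := by
  constructor
  · intro c hc
    simp only [PySem.Chars.strip, PySem.Chars.rstrip, PySem.Chars.lstrip, List.head?_reverse] at hc
    -- hc : getLast? of the dropWhile-suffix is some c
    obtain ⟨t, ht⟩ := List.dropWhile_suffix (l := (List.dropWhile PySem.Chars.isspace s).reverse) PySem.Chars.isspace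
    have hrev : (List.dropWhile PySem.Chars.isspace s).reverse.getLast? = some c := by
      rw [← ht, List.getLast?_append, hc]; rfl
    rw [List.getLast?_reverse] at hrev
    exact pv_dropWhile_head? _ _ _ hrev
  · intro c hc
    simp only [PySem.Chars.strip, PySem.Chars.rstrip, PySem.Chars.lstrip, List.getLast?_reverse] at hc
    exact pv_dropWhile_head? _ _ _ hc

lemma pv_ok_append (a mid b : List Char) (ha : a ≠ []) (hb : b ≠ [])
    (hoa : pvOk a) (hob : pvOk b) : pvOk (a ++ mid ++ b) := by
  constructor
  · intro c hc
    rw [List.append_assoc, List.head?_append] at hc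
    cases ha' : a.head? with
    | none => exact absurd (List.head?_eq_none_iff.mp ha') ha
    | some d =>
        rw [ha'] at hc
        simp only [Option.some_or] at hc
        exact hoa.1 c (by rw [ha']; exact hc)
  · intro c hc
    rw [List.getLast?_append] at hc
    cases hb' : b.getLast? with
    | none => exact absurd (List.getLast?_eq_none_iff.mp hb') hb
    | some d =>
        rw [hb'] at hc
        simp only [Option.some_or] at hc
        exact hob.2 c (by rw [hb']; exact hc)

lemma pv_join_ne (sep : List Char) (xs : List (List Char)) (hne : ∀ x ∈ xs, x ≠ []) :
    PySem.Chars.join sep xs = [] ↔ xs = [] := by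
  cases xs with
  | nil => simp [PySem.Chars.join_nil]
  | cons a t =>
      cases t with
      | nil => simp [PySem.Chars.join_singleton, hne a (by simp)]
      | cons b r =>
          rw [PySem.Chars.join_cons_cons]
          simp [hne a (by simp)]

lemma pv_join_append (sep : List Char) (xs : List (List Char)) (l : List Char) :
    PySem.Chars.join sep (xs ++ [l]) =
      if xs = [] then l else PySem.Chars.join sep xs ++ sep ++ l := by
  induction xs with
  | nil => simp [PySem.Chars.join_singleton]
  | cons a t ih =>
      cases t with
      | nil => simp [PySem.Chars.join_cons_cons, PySem.Chars.join_singleton]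
      | cons b r =>
          have h1 : (a :: b :: r) ++ [l] = a :: ((b :: r) ++ [l]) := by simp
          rw [h1]
          have h2 : (b :: r) ++ [l] = b :: (r ++ [l]) := by simp
          rw [h2, PySem.Chars.join_cons_cons, PySem.Chars.join_cons_cons]
          rw [← h2, ih]
          simp

lemma pv_ok_join (sep : List Char) (xs : List (List Char))
    (h : ∀ x ∈ xs, x ≠ [] ∧ pvOk x) : pvOk (PySem.Chars.join sep xs) := by
  induction xs with
  | nil => exact ⟨by simp [PySem.Chars.join_nil], by simp [PySem.Chars.join_nil]⟩
  | cons a t ih =>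
      cases t with
      | nil => rw [PySem.Chars.join_singleton]; exact (h a (by simp)).2
      | cons b r =>
          rw [PySem.Chars.join_cons_cons]
          have hj : PySem.Chars.join sep (b :: r) ≠ [] := by
            intro hc
            have := (pv_join_ne sep (b :: r) (fun x hx => (h x (List.mem_cons_of_mem a hx)).1)).mp hc
            simp at this
          exact pv_ok_append a sep _ (h a (by simp)).1 hj (h a (by simp)).2
            (ih (fun x hx => h x (List.mem_cons_of_mem a hx)))

lemma pv_body_ok (block : List (List Char)) (h : ∀ l ∈ block, l ≠ [] ∧ pvOk l) :
    pvOk (pvBodyB block) :=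
  pv_ok_join _ _ (fun x hx => h x (List.mem_of_mem_filter hx))

lemma pv_body_append (block : List (List Char)) (l : List Char)
    (hne : ∀ x ∈ block, x ≠ []) :
    pvBodyB (block ++ [l]) =
      if pvActA (PySem.Chars.lower l) then
        (if pvBodyB block ≠ [] then pvBodyB block ++ ' ' :: l else l)
      else pvBodyB block := by
  have hfe := pv_join_ne [' ']
    (block.filter (fun x => pvActB.any (fun k => PySem.Chars.isIn k.toList (PySem.Chars.lower x))))
    (fun x hx => hne x (List.mem_of_mem_filter hx))
  simp only [pvActB_eq] at hfe
  unfold pvBodyB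
  rw [List.filter_append]
  simp only [List.filter_cons, List.filter_nil, pvActB_eq]
  by_cases hact : pvActA (PySem.Chars.lower l)
  · simp only [hact, if_true]
    rw [pv_join_append]
    by_cases hf : block.filter (fun x => pvActA (PySem.Chars.lower x)) = []
    · simp [hf, PySem.Chars.join_nil]
    · have hjoin : PySem.Chars.join [' ']
          (block.filter (fun x => pvActA (PySem.Chars.lower x))) ≠ [] := by
        intro hc; exact hf (hfe.mp hc)
      simp [hf, hjoin]
  · simp [hact]

-- severity folds one line at a time
lemma pv_blocksev_append (block : List (List Char)) (l : List Char) (sev : String) :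
    pvBlockSev (block ++ [l]) sev = pvSevA (PySem.Chars.lower l) (pvBlockSev block sev) := by
  unfold pvBlockSev
  rw [List.foldl_append]
  simp [pvLineSevB_eq]

-- A's final flush, and B's push of the pending block, as named functions (proof helpers)
def pvFlushA (st : List (List (String × Option String)) × List Char × String) :
    List (List (String × Option String)) :=
  if st.2.1 ≠ [] then st.1 ++ [pvMk (PySem.Chars.strip st.2.1) st.2.2] else st.1

def pvPush (st : List (List (List Char)) × List (List Char)) : List (List (List Char)) :=
  if st.2 ≠ [] then st.1 ++ [st.2] else st.1

lemma pvPush_append (bs0 bs : List (List (List Char))) (p : List (List Char)) :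
    pvPush (bs0 ++ bs, p) = bs0 ++ pvPush (bs, p) := by
  unfold pvPush; split_ifs <;> simp

-- reference machine: line-by-line fold carrying (emitted, pending block lines, severity)
def pvRun (acc : List (List (String × Option String))) (parts : List (List Char)) (sev : String) :
    List (List Char) → List (List (String × Option String))
  | [] => if pvBodyB parts ≠ [] then acc ++ [pvMk (pvBodyB parts) sev] else acc
  | raw :: rest =>
      let line := PySem.Chars.strip raw
      if line = [] then
        if pvBodyB parts ≠ [] then pvRun (acc ++ [pvMk (pvBodyB parts) sev]) [] "info" rest
        else pvRun acc [] sev rest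
      else pvRun acc (parts ++ [line]) (pvSevA (PySem.Chars.lower line) sev) rest

-- A's fold equals the reference machine
lemma pv_A_run (lines : List (List Char)) :
    ∀ (acc : List (List (String × Option String))) (parts : List (List Char)) (sev : String),
      (∀ l ∈ parts, l ≠ [] ∧ pvOk l) →
      pvFlushA (lines.foldl pvStepA (acc, pvBodyB parts, sev)) = pvRun acc parts sev lines := by
  induction lines with
  | nil =>
      intro acc parts sev hp
      rw [List.foldl_nil]
      unfold pvFlushA
      simp only [pvRun]
      split_ifs with h1
      · rw [pv_strip_of_ok _ (pv_body_ok parts hp)]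
      · rfl
  | cons raw rest ih =>
      intro acc parts sev hp
      rw [List.foldl_cons]
      by_cases hline : PySem.Chars.strip raw = []
      · by_cases hb : pvBodyB parts = []
        · have hstep : pvStepA (acc, pvBodyB parts, sev) raw = (acc, pvBodyB [], sev) := by
            simp [pvStepA, hline, hb, pvBodyB_nil]
          rw [hstep, ih acc [] sev (by simp)]
          simp [pvRun, hline, hb]
        · have hstep : pvStepA (acc, pvBodyB parts, sev) raw =
              (acc ++ [pvMk (PySem.Chars.strip (pvBodyB parts)) sev], pvBodyB [], "info") := by
            simp [pvStepA, hline, hb, pvBodyB_nil]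
          rw [hstep, pv_strip_of_ok _ (pv_body_ok parts hp),
            ih (acc ++ [pvMk (pvBodyB parts) sev]) [] "info" (by simp)]
          simp [pvRun, hline, hb]
      · have hp' : ∀ l ∈ parts ++ [PySem.Chars.strip raw], l ≠ [] ∧ pvOk l := by
          intro l hl
          rcases List.mem_append.mp hl with h | h
          · exact hp l h
          · simp at h; subst h; exact ⟨hline, pv_ok_strip raw⟩
        have hcur := (pv_body_append parts (PySem.Chars.strip raw) (fun x hx => (hp x hx).1)).symm
        have hstep : pvStepA (acc, pvBodyB parts, sev) raw =
            (acc, pvBodyB (parts ++ [PySem.Chars.strip raw]),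
              pvSevA (PySem.Chars.lower (PySem.Chars.strip raw)) sev) := by
          simp only [pvStepA, if_neg hline]
          rw [hcur]
        rw [hstep, ih acc (parts ++ [PySem.Chars.strip raw]) _ hp']
        simp [pvRun, hline]

-- the grouping fold's accumulated blocks only prepend
lemma pv_G_split (lines : List (List Char)) :
    ∀ (bs : List (List (List Char))) (pend : List (List Char)),
      lines.foldl pvStepG (bs, pend) =
        (bs ++ (lines.foldl pvStepG ([], pend)).1, (lines.foldl pvStepG ([], pend)).2) := by
  induction lines with
  | nil => intro bs pend; simp
  | cons raw rest ih =>
      intro bs pend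
      simp only [List.foldl_cons]
      by_cases hline : PySem.Chars.strip raw = []
      · by_cases hpend : pend = []
        · have h1 : pvStepG (bs, pend) raw = (bs, pend) := by simp [pvStepG, hline, hpend]
          have h2 : pvStepG ([], pend) raw = ([], pend) := by simp [pvStepG, hline, hpend]
          rw [h1, h2]
          exact ih bs pend
        · have h1 : pvStepG (bs, pend) raw = (bs ++ [pend], []) := by simp [pvStepG, hline, hpend]
          have h2 : pvStepG ([], pend) raw = ([pend], []) := by simp [pvStepG, hline, hpend]
          rw [h1, h2, ih (bs ++ [pend]) [], ih [pend] []]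
          simp
      · have h1 : pvStepG (bs, pend) raw = (bs, pend ++ [PySem.Chars.strip raw]) := by
          simp [pvStepG, hline]
        have h2 : pvStepG ([], pend) raw = ([], pend ++ [PySem.Chars.strip raw]) := by
          simp [pvStepG, hline]
        rw [h1, h2]
        exact ih bs (pend ++ [PySem.Chars.strip raw])

-- the reference machine equals B's group-then-process pipeline
lemma pv_B_run (lines : List (List Char)) :
    ∀ (acc : List (List (String × Option String))) (pend : List (List Char)) (s0 : String),
      pvRun acc pend (pvBlockSev pend s0) lines =
        ((pvPush (lines.foldl pvStepG ([], pend))).foldl pvStepP (acc, s0)).1 := by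
  induction lines with
  | nil =>
      intro acc pend s0
      rw [List.foldl_nil]
      by_cases hpend : pend = []
      · subst hpend
        simp [pvRun, pvPush, pvBodyB_nil]
      · have hpu : pvPush ([], pend) = [pend] := by simp [pvPush, hpend]
        rw [hpu, List.foldl_cons, List.foldl_nil]
        simp only [pvRun]
        unfold pvStepP
        by_cases hb : pvBodyB pend = [] <;> simp [hb]
  | cons raw rest ih =>
      intro acc pend s0
      rw [List.foldl_cons]
      by_cases hline : PySem.Chars.strip raw = []
      · by_cases hpend : pend = []
        · have hstep : pvStepG ([], pend) raw = ([], ([] : List (List Char))) := by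
            simp [pvStepG, hline, hpend]
          rw [hstep]
          subst hpend
          have hI : pvRun acc [] (pvBlockSev [] s0) rest =
              ((pvPush (rest.foldl pvStepG ([], []))).foldl pvStepP (acc, s0)).1 := ih acc [] s0
          rw [← hI]
          simp [pvRun, hline, pvBodyB_nil]
        · have hstep : pvStepG ([], pend) raw = ([pend], ([] : List (List Char))) := by
            simp [pvStepG, hline, hpend]
          rw [hstep, pv_G_split rest [pend] []]
          rw [pvPush_append [pend] _ _]
          rw [show ([pend] : List (List (List Char))) ++ pvPush (rest.foldl pvStepG ([], [])) =
            pend :: pvPush (rest.foldl pvStepG ([], [])) from by simp]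
          rw [List.foldl_cons]
          by_cases hb : pvBodyB pend = []
          · have hP : pvStepP (acc, s0) pend = (acc, pvBlockSev pend s0) := by
              simp [pvStepP, hb]
            rw [hP]
            have hI : pvRun acc [] (pvBlockSev [] (pvBlockSev pend s0)) rest =
                ((pvPush (rest.foldl pvStepG ([], []))).foldl pvStepP (acc, pvBlockSev pend s0)).1 :=
              ih acc [] (pvBlockSev pend s0)
            rw [← hI]
            simp [pvRun, hline, hb, pvBlockSev]
          · have hP : pvStepP (acc, s0) pend =
                (acc ++ [pvMk (pvBodyB pend) (pvBlockSev pend s0)], "info") := by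
              simp [pvStepP, hb]
            rw [hP]
            have hI : pvRun (acc ++ [pvMk (pvBodyB pend) (pvBlockSev pend s0)]) [] (pvBlockSev [] "info") rest =
                ((pvPush (rest.foldl pvStepG ([], []))).foldl pvStepP
                  (acc ++ [pvMk (pvBodyB pend) (pvBlockSev pend s0)], "info")).1 :=
              ih (acc ++ [pvMk (pvBodyB pend) (pvBlockSev pend s0)]) [] "info"
            rw [← hI]
            simp [pvRun, hline, hb, pvBlockSev]
      · have hstep : pvStepG ([], pend) raw = ([], pend ++ [PySem.Chars.strip raw]) := by
          simp [pvStepG, hline]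
        rw [hstep]
        have hI := ih acc (pend ++ [PySem.Chars.strip raw]) s0
        rw [pv_blocksev_append pend _ s0] at hI
        rw [← hI]
        simp [pvRun, hline]

-- ===== VERDICT (by name: the statement is the Claim_ definition above) =====
theorem parse_ai_analysis_py_spec : Claim_equal_parse_ai_analysis_py := by
  intro analysis _
  unfold Spec_parse_ai_analysis_py
  have hA : pvFlushA ((PySem.Chars.splitOn analysis.toList ['\n']).foldl pvStepA ([], [], "info")) =
      pvRun [] [] "info" (PySem.Chars.splitOn analysis.toList ['\n']) :=
    pv_A_run (PySem.Chars.splitOn analysis.toList ['\n']) [] [] "info" (by simp)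
  have hB : pvRun [] [] "info" (PySem.Chars.splitOn analysis.toList ['\n']) =
      ((pvPush ((PySem.Chars.splitOn analysis.toList ['\n']).foldl pvStepG ([], []))).foldl
        pvStepP ([], "info")).1 :=
    pv_B_run (PySem.Chars.splitOn analysis.toList ['\n']) [] [] "info"
  have h1 : parse_ai_analysis_py analysis =
      pvFlushA ((PySem.Chars.splitOn analysis.toList ['\n']).foldl pvStepA ([], [], "info")) := rfl
  have h2 : parse_ai_analysis_py_alt analysis =
      ((pvPush ((PySem.Chars.splitOn analysis.toList ['\n']).foldl pvStepG ([], []))).foldl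
        pvStepP ([], "info")).1 := rfl
  rw [h1, h2, hA, hB]
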